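-- pv_equiv track=rewrite | github.com/shora666/lib | S3_Client.py | _remove_num_format
-- ===== SOURCE A (Python) =====
-- def _remove_num_format(buf):
--     start = False
--     end = False
--     i=0
--     ltr = list()
--     for c in buf:
--         if not start:
--             if c == '"':
--                 start=True
--                 end = False
--             else:
--                 ltr.append(c)
--         elif not end:
--             if c != ',':
--                 if c == '"' :
--                     start = False
--                     end = True
--                 else:
--                     ltr.append(c)
--
--     buf = ''
--     for c in ltr:
--         if c!="\r":
--             buf += c
--     return buf
-- ===== SOURCE B (Python) =====
-- def _remove_num_format(buf):
--     # Split on quotes: even-indexed segments are outside quoted regions (strip '\r'),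
--     # odd-indexed ones are inside (strip ',' and '\r'); the quotes vanish at the seams.
--     parts = buf.split('"')
--     return ''.join(
--         p.replace(',', '').replace('\r', '') if i % 2 else p.replace('\r', '')
--         for i, p in enumerate(parts)
--     )
-- ===== Notes on version B (the rewrite author's own statement) =====
-- stated objective: faster
-- what changed: B replaces A's character-by-character two-flag state machine plus a second concatenation pass by splitting the buffer on the double-quote character and, by segment parity, deleting commas and carriage returns from inside-quote segments and carriage returns from outside ones, then joining once.
import Mathlib
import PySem

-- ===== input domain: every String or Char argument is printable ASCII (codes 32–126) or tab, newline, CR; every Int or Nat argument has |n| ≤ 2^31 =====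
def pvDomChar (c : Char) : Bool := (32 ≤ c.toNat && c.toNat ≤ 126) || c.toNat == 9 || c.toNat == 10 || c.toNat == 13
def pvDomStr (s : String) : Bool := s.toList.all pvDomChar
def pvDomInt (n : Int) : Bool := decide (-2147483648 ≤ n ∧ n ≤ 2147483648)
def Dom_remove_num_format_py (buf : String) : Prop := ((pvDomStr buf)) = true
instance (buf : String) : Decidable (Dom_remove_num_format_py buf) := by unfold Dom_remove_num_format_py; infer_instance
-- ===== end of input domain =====

-- B replaces A's two-flag character state machine (plus a second '\r'-stripping pass)
-- by split-on-'"' / parity-dependent per-segment deletion / one join; equal return values on all of Dom.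

-- ===== PORT A =====
-- first loop of A: the quote/comma state machine with start/end flags, accumulating ltr
def pvLoopA : Bool → Bool → List Char → List Char → List Char
  | _, _, ltr, [] => ltr
  | start, end_, ltr, c :: cs =>
    if !start then
      if c = '"' then pvLoopA true false ltr cs
      else pvLoopA start end_ (ltr ++ [c]) cs
    else if !end_ then
      if c ≠ ',' then
        if c = '"' then pvLoopA false true ltr cs
        else pvLoopA start end_ (ltr ++ [c]) cs
      else pvLoopA start end_ ltr cs
    else pvLoopA start end_ ltr cs

-- second loop of A: buf = ''; for c in ltr: if c != '\r': buf += c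
def pvStripA : List Char → List Char → List Char
  | acc, [] => acc
  | acc, c :: cs => if c ≠ '\r' then pvStripA (acc ++ [c]) cs else pvStripA acc cs

def remove_num_format_py (buf : String) : String :=
  String.mk (pvStripA [] (pvLoopA false false [] buf.toList))

-- ===== PORT B =====
-- buf.split('"') over the char list (exact: standard single-char separator split)
def pvSplitQ : List Char → List (List Char)
  | [] => [[]]
  | c :: cs =>
    if c = '"' then [] :: pvSplitQ cs
    else match pvSplitQ cs with
      | [] => [[c]]          -- unreachable: pvSplitQ never returns []
      | p :: ps => (c :: p) :: ps

-- p.replace(x, '') — exact: deleting every occurrence of a single char is a filter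
def pvDel (x : Char) (p : List Char) : List Char := p.filter (· ≠ x)

-- the per-segment expression of Source B's comprehension: inside (odd i) drop ',' then '\r', outside drop '\r'
def pvProc (i : Int) (p : List Char) : List Char :=
  if i % 2 ≠ 0 then pvDel '\x0d' (pvDel ',' p) else pvDel '\x0d' p

-- ''.join(... for i, p in enumerate(parts))
def remove_num_format_py_alt (buf : String) : String :=
  String.mk (((PySem.List.enumerate (pvSplitQ buf.toList) 0).map
    (fun ip => pvProc ip.1 ip.2)).flatten)

-- ===== PRECONDITION & SPEC =====
def Spec_remove_num_format_py (buf : String) (out : String) : Prop := out = remove_num_format_py_alt buf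
instance (buf : String) (out : String) : Decidable (Spec_remove_num_format_py buf out) := by unfold Spec_remove_num_format_py; infer_instance

-- ===== CLAIM (what is proved, stated in full; the proofs are below) =====
def Claim_equal_remove_num_format_py : Prop := ∀ (buf : String), Dom_remove_num_format_py buf → Spec_remove_num_format_py buf (remove_num_format_py buf)

-- ===== LEMMAS AND PROOFS =====

-- common spec: a one-boolean quote state machine both sides are reduced to
def pvGo : Bool → List Char → List Char
  | _, [] => []
  | false, c :: cs =>
    if c = '"' then pvGo true cs
    else if c ≠ '\x0d' then c :: pvGo false cs
    else pvGo false cs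
  | true, c :: cs =>
    if c = '"' then pvGo false cs
    else if c ≠ ',' ∧ c ≠ '\x0d' then c :: pvGo true cs
    else pvGo true cs

def pvKeep (c : Char) : Bool := !(c == '\x0d')

lemma pvStripA_eq_filter (l : List Char) : ∀ acc, pvStripA acc l = acc ++ l.filter pvKeep := by
  induction l with
  | nil => intro acc; simp [pvStripA]
  | cons c cs ih =>
    intro acc
    by_cases h : c = '\x0d'
    · simp [pvStripA, h, ih, show pvKeep '\x0d' = false from rfl]
    · have hk : pvKeep c = true := by simp [pvKeep, h]
      simp [pvStripA, h, ih, hk]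

lemma pvLoopA_filter_eq_go (l : List Char) :
    ∀ (s e : Bool) (acc : List Char), (s = true → e = false) →
      (pvLoopA s e acc l).filter pvKeep = acc.filter pvKeep ++ pvGo s l := by
  induction l with
  | nil => intro s e acc _; simp [pvLoopA, pvGo]
  | cons c cs ih =>
    intro s e acc hse
    cases s with
    | false =>
      by_cases hq : c = '"'
      · have h1 : pvLoopA false e acc (c :: cs) = pvLoopA true false acc cs := by
          simp [pvLoopA, hq]
        have h2 : pvGo false (c :: cs) = pvGo true cs := by simp [pvGo, hq]
        rw [h1, h2]; exact ih true false acc (fun _ => rfl)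
      · by_cases hr : c = '\x0d'
        · simp [pvLoopA, pvGo, hr, ih _ _ _ hse, List.filter_append,
                show pvKeep '\x0d' = false from rfl]
        · have hk : pvKeep c = true := by simp [pvKeep, hr]
          simp [pvLoopA, pvGo, hq, hr, hk, ih _ _ _ hse, List.filter_append]
    | true =>
      have he : e = false := hse rfl
      subst he
      by_cases hc : c = ','
      · simp [pvLoopA, pvGo, hc, ih _ _ _ (fun _ => rfl)]
      · by_cases hq : c = '"'
        · have h1 : pvLoopA true false acc (c :: cs) = pvLoopA false true acc cs := by
            simp [pvLoopA, hq]
          have h2 : pvGo true (c :: cs) = pvGo false cs := by simp [pvGo, hq]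
          rw [h1, h2]; exact ih false true acc (fun h => nomatch h)
        · by_cases hr : c = '\x0d'
          · simp [pvLoopA, pvGo, hr, ih _ _ _ (fun _ => rfl), List.filter_append,
                  show pvKeep '\x0d' = false from rfl]
          · have hk : pvKeep c = true := by simp [pvKeep, hr]
            simp [pvLoopA, pvGo, hq, hc, hr, hk, ih _ _ _ (fun _ => rfl),
                  List.filter_append]

-- B side: the joined, parity-processed split equals the same state machine
def pvJ (i : Int) (parts : List (List Char)) : List Char :=
  ((PySem.List.enumerate parts i).map (fun ip => pvProc ip.1 ip.2)).flatten

lemma pvJ_cons (i : Int) (p : List Char) (ps : List (List Char)) :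
    pvJ i (p :: ps) = pvProc i p ++ pvJ (i + 1) ps := by
  simp [pvJ, PySem.List.enumerate_cons]

lemma pvSplitQ_ne_nil (l : List Char) : pvSplitQ l ≠ [] := by
  cases l with
  | nil => simp [pvSplitQ]
  | cons c cs =>
    by_cases h : c = '"'
    · simp [pvSplitQ, h]
    · simp only [pvSplitQ, if_neg h]
      cases pvSplitQ cs <;> simp

lemma pvJ_splitQ_eq_go (l : List Char) :
    ∀ i : Int, 0 ≤ i → pvJ i (pvSplitQ l) = pvGo (decide (i % 2 ≠ 0)) l := by
  induction l with
  | nil =>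
    intro i _
    simp [pvSplitQ, pvJ_cons, pvJ, pvProc, pvDel, pvGo]
  | cons c cs ih =>
    intro i hi
    by_cases hq : c = '"'
    · have hpar : decide ((i + 1) % 2 ≠ 0) = !(decide (i % 2 ≠ 0)) := by
        rcases Int.emod_two_eq_zero_or_one i with h | h <;> simp [h] <;> omega
      rw [show pvSplitQ (c :: cs) = [] :: pvSplitQ cs by simp [pvSplitQ, hq]]
      rw [pvJ_cons, ih (i + 1) (by omega)]
      have : pvProc i [] = [] := by simp [pvProc, pvDel]
      rw [this, List.nil_append, hpar]
      cases hd : decide (i % 2 ≠ 0) <;> simp [pvGo, hq] <;> rw [hpar, hd] <;> rfl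
    · obtain ⟨p, ps, hps⟩ : ∃ p ps, pvSplitQ cs = p :: ps := by
        cases h : pvSplitQ cs with
        | nil => exact absurd h (pvSplitQ_ne_nil cs)
        | cons p ps => exact ⟨p, ps, rfl⟩
      have hsq : pvSplitQ (c :: cs) = (c :: p) :: ps := by
        simp [pvSplitQ, hq, hps]
      have hproc : pvProc i (c :: p) =
          (if decide (i % 2 ≠ 0) = true then
            (if c ≠ ',' ∧ c ≠ '\x0d' then [c] else []) else
            (if c ≠ '\x0d' then [c] else [])) ++ pvProc i p := by
        by_cases hpar : i % 2 ≠ 0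
        · by_cases hc : c = ','
          · simp [pvProc, pvDel, hpar, hc]
          · by_cases hr : c = '\x0d' <;> simp [pvProc, pvDel, hpar, hc, hr]
        · by_cases hr : c = '\x0d' <;> simp [pvProc, pvDel, hpar, hr]
      have hrest : pvProc i p ++ pvJ (i + 1) ps = pvJ i (pvSplitQ cs) := by
        rw [hps, pvJ_cons]
      rw [hsq, pvJ_cons, hproc, List.append_assoc, hrest, ih i hi]
      cases hd : decide (i % 2 ≠ 0) with
      | false =>
        by_cases hr : c = '\x0d' <;> simp [pvGo, hq, hr]
      | true =>
        by_cases hc : c = ','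
        · simp [pvGo, hc]
        · by_cases hr : c = '\x0d' <;> simp [pvGo, hq, hc, hr]

-- ===== VERDICT (by name: the statement is the Claim_ definition above) =====
theorem remove_num_format_py_spec : Claim_equal_remove_num_format_py := by
  intro buf _
  unfold Spec_remove_num_format_py remove_num_format_py remove_num_format_py_alt
  rw [pvStripA_eq_filter, pvLoopA_filter_eq_go buf.toList false false [] (by simp)]
  have := pvJ_splitQ_eq_go buf.toList 0 (by norm_num)
  simp [pvJ] at this
  simp [this]
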